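-- pv_equiv track=rewrite | github.com/BekirCan1219/Kriptoloji-Proje | crypto/manual_aes.py | manual_aes_encrypt
-- ===== SOURCE A (Python) =====
-- BLOCK_SIZE = 4
--
-- def _pkcs7_pad(data: bytes, block_size: int = BLOCK_SIZE) -> bytes:
--     pad_len = block_size - (len(data) % block_size)
--     return data + bytes([pad_len]) * pad_len
--
-- def _normalize_key(key: str) -> bytes:
--
--     key_bytes = key.encode("utf-8")
--     if len(key_bytes) == 0:
--         raise ValueError("Manual AES için anahtar boş olamaz.")
--     if len(key_bytes) >= BLOCK_SIZE:
--         return key_bytes[:BLOCK_SIZE]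
--     # kısa ise 0 ile pad
--     return key_bytes.ljust(BLOCK_SIZE, b"\x00")
--
-- def _sbox_byte(b: int) -> int:
--
--     return ((b ^ 0xAA) + 0x11) % 256
--
-- def sub_bytes(state):
--     return [_sbox_byte(b) for b in state]
--
-- def shift_rows(state):
--
--     if len(state) != 4:
--         raise ValueError("ShiftRows için blok boyutu 4 olmalı.")
--     b0, b1, b2, b3 = state
--     return [b0, b2, b3, b1]
--
-- def add_round_key(state, key_bytes):
--     return [b ^ k for b, k in zip(state, key_bytes)]
--
-- def _encrypt_block(block: bytes, key_bytes: bytes) -> bytes: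
--
--     if len(block) != BLOCK_SIZE:
--         raise ValueError("Blok boyutu 4 olmalı.")
--     state = list(block)
--
--     # Round 1
--     state = sub_bytes(state)
--     state = shift_rows(state)
--     state = add_round_key(state, key_bytes)
--
--     # Round 2
--     state = sub_bytes(state)
--     state = shift_rows(state)
--     state = add_round_key(state, key_bytes)
--
--     return bytes(state)
--
-- def manual_aes_encrypt(plaintext: str, key: str) -> str:
--
--     key_bytes = _normalize_key(key)
--     data = plaintext.encode("utf-8")
--     padded = _pkcs7_pad(data, BLOCK_SIZE)
--
--     cipher_bytes = bytearray()
--     for i in range(0, len(padded), BLOCK_SIZE):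
--         block = padded[i:i + BLOCK_SIZE]
--         cipher_bytes.extend(_encrypt_block(block, key_bytes))
--
--     # DB ve ağda rahat taşımak için hex string döndürüyoruz
--     return cipher_bytes.hex()
-- ===== SOURCE B (Python) =====
-- BLOCK_SIZE = 4
--
--
-- def manual_aes_encrypt(plaintext: str, key: str) -> str:
--     key_bytes = key.encode("utf-8")
--     if len(key_bytes) == 0:
--         raise ValueError("Manual AES için anahtar boş olamaz.")
--     if len(key_bytes) >= BLOCK_SIZE:
--         key_bytes = key_bytes[:BLOCK_SIZE]
--     else:
--         key_bytes = key_bytes.ljust(BLOCK_SIZE, b"\x00")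
--     k0, k1, k2, k3 = key_bytes
--
--     # One 256-entry table per output byte position: the two sub/shift/add
--     # rounds collapse into a single lookup, the shift_rows permutation is
--     # baked into which input byte feeds which table.
--     f = lambda b: ((b ^ 0xAA) + 0x11) % 256
--     T0 = bytes(f(f(x) ^ k0) ^ k0 for x in range(256))
--     T1 = bytes(f(f(x) ^ k2) ^ k1 for x in range(256))
--     T2 = bytes(f(f(x) ^ k3) ^ k2 for x in range(256))
--     T3 = bytes(f(f(x) ^ k1) ^ k3 for x in range(256))
--
--     data = plaintext.encode("utf-8")
--     pad = BLOCK_SIZE - len(data) % BLOCK_SIZE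
--     padded = data + bytes([pad]) * pad
--
--     out = bytearray()
--     for i in range(0, len(padded), BLOCK_SIZE):
--         b0, b1, b2, b3 = padded[i:i + BLOCK_SIZE]
--         out += bytes((T0[b0], T1[b3], T2[b1], T3[b2]))
--     return out.hex()
-- ===== Notes on version B (the rewrite author's own statement) =====
-- stated objective: faster
-- what changed: Replaces the per-block two-round sub_bytes/shift_rows/add_round_key pipeline by four precomputed 256-entry lookup tables (one per output byte position, with the composed shift_rows permutation baked into which input byte indexes which table), so each output byte is a single bytes-table lookup instead of eight list-building helper calls per block.
import Mathlib
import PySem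

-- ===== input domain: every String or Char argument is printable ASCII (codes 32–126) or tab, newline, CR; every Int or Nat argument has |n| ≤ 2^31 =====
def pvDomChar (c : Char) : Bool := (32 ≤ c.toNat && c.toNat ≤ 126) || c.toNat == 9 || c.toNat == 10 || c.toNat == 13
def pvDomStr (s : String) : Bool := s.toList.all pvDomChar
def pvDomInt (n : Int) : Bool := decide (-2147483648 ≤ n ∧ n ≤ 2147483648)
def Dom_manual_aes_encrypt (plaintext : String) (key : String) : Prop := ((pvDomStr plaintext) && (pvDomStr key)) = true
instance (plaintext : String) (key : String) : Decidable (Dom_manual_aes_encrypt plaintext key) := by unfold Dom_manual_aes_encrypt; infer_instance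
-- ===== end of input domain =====

-- B precomputes four 256-entry tables (one per output byte position, the composed
-- shift_rows permutation baked into the indexing) instead of A's two-round pipeline.

-- shared helpers (identical calls in both Pythons):
-- str.encode("utf-8"): exact on the ASCII domain Dom_ (each char is one byte = its code)
def pvEncode (s : String) : List Nat := s.toList.map (fun c => c.toNat)
-- bytes.hex(): lowercase two-digit hex per byte; exact for byte values 0..255
def pvHexDigit (n : Nat) : Char := if n < 10 then Char.ofNat (48 + n) else Char.ofNat (87 + n)
def pvHexBytes (bs : List Nat) : String :=
  String.ofList (bs.flatMap (fun b => [pvHexDigit (b / 16), pvHexDigit (b % 16)]))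

-- ===== PORT A =====
def pvSboxByte (b : Nat) : Nat := ((b ^^^ 0xAA) + 0x11) % 256

def pvSubBytes (state : List Nat) : List Nat := state.map pvSboxByte

-- ValueError branch (len ≠ 4) is unreachable from manual_aes_encrypt; [] stands in
def pvShiftRows (state : List Nat) : List Nat :=
  match state with
  | [b0, b1, b2, b3] => [b0, b2, b3, b1]
  | _ => []

def pvAddRoundKey (state keyBytes : List Nat) : List Nat :=
  List.zipWith (fun b k => b ^^^ k) state keyBytes

def pvPkcs7Pad (data : List Nat) (blockSize : Nat) : List Nat :=
  let padLen := blockSize - data.length % blockSize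
  data ++ List.replicate padLen padLen

-- len(key_bytes) == 0 raises ValueError: excluded by Pre_ (the if is dropped, Pre_ guards it)
def pvNormalizeKey (key : String) : List Nat :=
  let keyBytes := pvEncode key
  if keyBytes.length ≥ 4 then keyBytes.take 4
  else keyBytes ++ List.replicate (4 - keyBytes.length) 0

-- len(block) ≠ 4 ValueError is unreachable (padded length is a multiple of 4)
def pvEncryptBlock (block keyBytes : List Nat) : List Nat :=
  let s1 := pvAddRoundKey (pvShiftRows (pvSubBytes block)) keyBytes
  pvAddRoundKey (pvShiftRows (pvSubBytes s1)) keyBytes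

def manual_aes_encrypt (plaintext : String) (key : String) : String :=
  let keyBytes := pvNormalizeKey key
  let data := pvEncode plaintext
  let padded := pvPkcs7Pad data 4
  let cipher := (PySem.List.pyRange 0 (padded.length : Int) 4).foldl
    (fun acc i => acc ++ pvEncryptBlock (PySem.List.slice padded (some i) (some (i + 4))) keyBytes) []
  pvHexBytes cipher

-- ===== PORT B =====
def pvF (b : Nat) : Nat := ((b ^^^ 0xAA) + 0x11) % 256

def pvTable (k k' : Nat) : List Nat := (List.range 256).map (fun x => pvF (pvF x ^^^ k) ^^^ k')

def manual_aes_encrypt_alt (plaintext : String) (key : String) : String :=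
  let kb0 := pvEncode key
  -- empty key raises ValueError: excluded by Pre_
  let kb := if kb0.length ≥ 4 then kb0.take 4 else kb0 ++ List.replicate (4 - kb0.length) 0
  let k0 := kb.getD 0 0
  let k1 := kb.getD 1 0
  let k2 := kb.getD 2 0
  let k3 := kb.getD 3 0
  let t0 := pvTable k0 k0
  let t1 := pvTable k2 k1
  let t2 := pvTable k3 k2
  let t3 := pvTable k1 k3
  let data := pvEncode plaintext
  let pad := 4 - data.length % 4
  let padded := data ++ List.replicate pad pad
  let cipher := (PySem.List.pyRange 0 (padded.length : Int) 4).foldl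
    (fun acc i =>
      match PySem.List.slice padded (some i) (some (i + 4)) with
      | [b0, b1, b2, b3] => acc ++ [t0.getD b0 0, t1.getD b3 0, t2.getD b1 0, t3.getD b2 0]
      | _ => acc) []  -- tuple-unpack of a non-4 slice raises: unreachable
  pvHexBytes cipher

-- ===== PRECONDITION & SPEC =====
-- Pre_ excludes only the empty key, on which A raises ValueError.
def Pre_manual_aes_encrypt (plaintext : String) (key : String) : Prop := key ≠ ""
instance (plaintext : String) (key : String) : Decidable (Pre_manual_aes_encrypt plaintext key) := by
  unfold Pre_manual_aes_encrypt; infer_instance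

def pvWitness_manual_aes_encrypt : String × String := ("hi", "key")

def Spec_manual_aes_encrypt (plaintext : String) (key : String) (out : String) : Prop := out = manual_aes_encrypt_alt plaintext key
instance (plaintext : String) (key : String) (out : String) : Decidable (Spec_manual_aes_encrypt plaintext key out) := by unfold Spec_manual_aes_encrypt; infer_instance

-- ===== CLAIM (what is proved, stated in full; the proofs are below) =====
def Claim_equal_manual_aes_encrypt : Prop := ∀ (plaintext : String) (key : String), Dom_manual_aes_encrypt plaintext key → Pre_manual_aes_encrypt plaintext key → Spec_manual_aes_encrypt plaintext key (manual_aes_encrypt plaintext key)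

-- ===== LEMMAS AND PROOFS =====

-- a list of length 4 is an explicit 4-element list of its getD's
theorem pv_len4_explicit (l : List Nat) (h : l.length = 4) :
    l = [l.getD 0 0, l.getD 1 0, l.getD 2 0, l.getD 3 0] := by
  match l, h with
  | [a, b, c, d], _ => rfl

theorem pv_table_getD (k k' b : Nat) (hb : b < 256) :
    (pvTable k k').getD b 0 = pvF (pvF b ^^^ k) ^^^ k' := by
  unfold pvTable
  rw [List.getD_eq_getElem?_getD, List.getElem?_map, List.getElem?_range hb]
  rfl

-- the normalized key has length 4
theorem pv_key_len (key : String) (hk : key ≠ "") :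
    (pvNormalizeKey key).length = 4 := by
  unfold pvNormalizeKey pvEncode
  have hne : key.toList ≠ [] := fun h => hk (by
    have := congrArg List.length h
    exact String.ext (by simpa using h))
  simp only []
  split
  · rename_i h
    rw [List.length_take]
    simp only [List.length_map] at h ⊢
    omega
  · rename_i h
    simp only [List.length_map, List.length_append, List.length_replicate] at h ⊢
    omega

-- per-block equality: A's two rounds on an explicit 4-byte block equal B's table lookups
theorem pv_block_eq (b0 b1 b2 b3 k0 k1 k2 k3 : Nat)
    (h0 : b0 < 256) (h1 : b1 < 256) (h2 : b2 < 256) (h3 : b3 < 256) :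
    pvEncryptBlock [b0, b1, b2, b3] [k0, k1, k2, k3] =
      [(pvTable k0 k0).getD b0 0, (pvTable k2 k1).getD b3 0,
       (pvTable k3 k2).getD b1 0, (pvTable k1 k3).getD b2 0] := by
  rw [pv_table_getD _ _ _ h0, pv_table_getD _ _ _ h3, pv_table_getD _ _ _ h1,
      pv_table_getD _ _ _ h2]
  simp [pvEncryptBlock, pvSubBytes, pvShiftRows, pvAddRoundKey, pvSboxByte, pvF]

-- 4 ≤ length gives an explicit head of four elements
theorem pv_take4 (l : List Nat) (h : 4 ≤ l.length) :
    ∃ a b c d t, l = a :: b :: c :: d :: t := by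
  match l, h with
  | a :: b :: c :: d :: t, _ => exact ⟨a, b, c, d, t, rfl⟩

-- ===== VERDICT (by name: the statement is the Claim_ definition above) =====
theorem manual_aes_encrypt_spec : Claim_equal_manual_aes_encrypt := by
  intro plaintext key hdom hpre
  unfold Spec_manual_aes_encrypt manual_aes_encrypt manual_aes_encrypt_alt pvPkcs7Pad
  simp only []
  rw [show (if (pvEncode key).length ≥ 4 then List.take 4 (pvEncode key)
            else pvEncode key ++ List.replicate (4 - (pvEncode key).length) 0) = pvNormalizeKey key from rfl]
  set data := pvEncode plaintext with hdata
  set pad := 4 - data.length % 4 with hpad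
  set padded := data ++ List.replicate pad pad with hpaddedeq
  set kb := pvNormalizeKey key with hkbdef
  have hlen4 : kb.length = 4 := pv_key_len key hpre
  -- padded length is a multiple of 4
  have hpadlen : padded.length % 4 = 0 := by
    simp [hpaddedeq, hpad]
    omega
  -- all bytes of padded are < 256
  have hbytes : ∀ b ∈ padded, b < 256 := by
    intro b hb
    rcases List.mem_append.mp hb with h | h
    · rcases List.mem_map.mp h with ⟨c, hc, rfl⟩
      have hcd : pvDomChar c = true := by
        have hp : pvDomStr plaintext = true := by
          unfold Dom_manual_aes_encrypt at hdom
          simp only [Bool.and_eq_true] at hdom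
          exact hdom.1
        exact List.all_eq_true.mp hp c hc
      unfold pvDomChar at hcd
      simp at hcd
      omega
    · have := List.eq_of_mem_replicate h
      omega
  congr 1
  apply PySem.List.foldl_congr_mem
  intro acc i hi
  obtain ⟨h0, hltI, hdvd⟩ := (PySem.List.mem_pyRange_iff_of_pos (by norm_num : (0:Int) < 4) i).mp hi
  obtain ⟨c, hcq⟩ := hdvd
  have hc0 : 0 ≤ c := by omega
  obtain ⟨m, rfl⟩ := Int.eq_ofNat_of_zero_le hc0
  have hiq : i = ((4 * m : Nat) : Int) := by push_cast; omega
  subst hiq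
  have hlt : 4 * m < padded.length := by exact_mod_cast hltI
  have hle : 4 * m + 4 ≤ padded.length := by omega
  have hslice : PySem.List.slice padded (some ((4 * m : Nat) : Int)) (some (((4 * m : Nat) : Int) + 4)) =
      (padded.drop (4 * m)).take 4 := by
    rw [show (((4 * m : Nat) : Int) + 4) = ((4 * m : Nat) : Int) + ((4:Nat) : Int) from by push_cast; ring,
        PySem.List.slice_natCast_add]
  have hdl : 4 ≤ (padded.drop (4 * m)).length := by
    simp
    omega
  obtain ⟨a, b, c, d, t, hexp⟩ := pv_take4 _ hdl
  have hmemdrop : ∀ x ∈ padded.drop (4 * m), x < 256 := fun x hx => hbytes x (List.mem_of_mem_drop hx)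
  have ha : a < 256 := hmemdrop a (by rw [hexp]; simp)
  have hb : b < 256 := hmemdrop b (by rw [hexp]; simp)
  have hc : c < 256 := hmemdrop c (by rw [hexp]; simp)
  have hd : d < 256 := hmemdrop d (by rw [hexp]; simp)
  rw [hslice, hexp]
  simp only [List.take_succ_cons, List.take_zero]
  rw [show kb = [kb.getD 0 0, kb.getD 1 0, kb.getD 2 0, kb.getD 3 0] from pv_len4_explicit kb hlen4]
  rw [pv_block_eq a b c d _ _ _ _ ha hb hc hd]
  rfl
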